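-- pv_equiv track=rewrite | github.com/Mvk122/Leetcode-Solutions | string_substrings.py | func
-- ===== SOURCE A (Python) =====
-- from collections import Counter
--
-- def func(s, k):
--     found = 0
--
--     l = Counter("")
--     r = Counter(s)
--
--     for char in s:
--         if len(set(l).intersection(set(r))) > k:
--             found += 1
--
--         if char in l:
--             l[char] += 1
--         else:
--             l[char] = 1
--
--         if char in r:
--             if r[char] == 1:
--                 del r[char]
--             else:
--                 r[char] -= 1
--
--     return found
-- ===== SOURCE B (Python) =====
-- from collections import Counter
--
-- def func(s, k):
--     found = 0
--     common = 0          # number of characters occurring in both prefix and suffix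
--     l = Counter()
--     r = Counter(s)
--     for c in s:
--         if common > k:
--             found += 1
--         lc = l[c]
--         rc = r[c]
--         if lc == 0 and rc > 1:
--             common += 1
--         elif lc > 0 and rc == 1:
--             common -= 1
--         l[c] = lc + 1
--         r[c] = rc - 1
--     return found
-- ===== Notes on version B (the rewrite author's own statement) =====
-- stated objective: faster
-- what changed: Instead of rebuilding both key sets and their intersection at every boundary position, B maintains the number of characters common to prefix and suffix as a single integer updated in O(1) per step.
import Mathlib
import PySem

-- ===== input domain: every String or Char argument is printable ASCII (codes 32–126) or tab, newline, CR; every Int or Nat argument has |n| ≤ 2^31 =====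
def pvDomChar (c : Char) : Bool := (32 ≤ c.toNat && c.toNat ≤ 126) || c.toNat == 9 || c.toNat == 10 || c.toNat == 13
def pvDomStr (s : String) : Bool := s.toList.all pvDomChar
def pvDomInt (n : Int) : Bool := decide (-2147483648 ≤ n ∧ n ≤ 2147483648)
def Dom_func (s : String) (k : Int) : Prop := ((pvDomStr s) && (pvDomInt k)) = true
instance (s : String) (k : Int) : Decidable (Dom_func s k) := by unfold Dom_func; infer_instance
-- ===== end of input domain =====

-- B replaces A's per-position set-intersection rebuild by an incrementally maintained
-- count of characters common to prefix and suffix (objective: faster, O(n·σ) → O(n)).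

-- ===== PORT A =====
-- len(set(l).intersection(set(r))) of A's loop, named for readability
def interA (l r : PySem.Dict Char Int) : Int :=
  PySem.Set.len (PySem.Set.inter (PySem.Set.ofList l.keys) (PySem.Set.ofList r.keys))

-- the body of A's 'for char in s' loop over the state (found, l, r)
def stepA (k : Int) (st : Int × PySem.Dict Char Int × PySem.Dict Char Int) (ch : Char) :
    Int × PySem.Dict Char Int × PySem.Dict Char Int :=
  let found := if interA st.2.1 st.2.2 > k then st.1 + 1 else st.1
  let l := if st.2.1.contains ch then st.2.1.insert ch (st.2.1.getD ch 0 + 1)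
           else st.2.1.insert ch 1
  let r := if st.2.2.contains ch then
             (if st.2.2.getD ch 0 = 1 then st.2.2.erase ch
              else st.2.2.insert ch (st.2.2.getD ch 0 - 1))
           else st.2.2
  (found, l, r)

def func (s : String) (k : Int) : Int :=
  ((s.toList).foldl (stepA k) (0, PySem.Dict.counter ("".toList), PySem.Dict.counter s.toList)).1

-- ===== PORT B =====
-- the body of B's loop over the state (found, common, l, r)
def stepB (k : Int) (st : Int × Int × PySem.Dict Char Int × PySem.Dict Char Int) (c : Char) :
    Int × Int × PySem.Dict Char Int × PySem.Dict Char Int :=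
  let found := if st.2.1 > k then st.1 + 1 else st.1
  let lc := st.2.2.1.getD c 0
  let rc := st.2.2.2.getD c 0
  let common := if lc = 0 ∧ rc > 1 then st.2.1 + 1
                else if lc > 0 ∧ rc = 1 then st.2.1 - 1
                else st.2.1
  (found, common, st.2.2.1.insert c (lc + 1), st.2.2.2.insert c (rc - 1))

def func_alt (s : String) (k : Int) : Int :=
  ((s.toList).foldl (stepB k) (0, 0, PySem.Dict.empty, PySem.Dict.counter s.toList)).1

-- ===== PRECONDITION & SPEC =====
def Spec_func (s : String) (k : Int) (out : Int) : Prop := out = func_alt s k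
instance (s : String) (k : Int) (out : Int) : Decidable (Spec_func s k out) := by unfold Spec_func; infer_instance

-- ===== CLAIM (what is proved, stated in full; the proofs are below) =====
def Claim_equal_func : Prop := ∀ (s : String) (k : Int), Dom_func s k → Spec_func s k (func s k)

-- ===== LEMMAS AND PROOFS =====

-- a list-level fact about lookups in a key-filtered association list
theorem any_key_filter (l : List (Char × Int)) (k c : Char) :
    ((l.filter (fun p => !(p.1 == k))).any (fun p => p.1 == c))
      = ((l.any (fun p => p.1 == c)) && !(c == k)) := by
  rw [Bool.eq_iff_iff]
  simp only [List.any_eq_true, List.mem_filter, Bool.and_eq_true, Bool.not_eq_true',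
    beq_iff_eq, beq_eq_false_iff_ne, ne_eq]
  constructor
  · rintro ⟨p, ⟨hm, hk⟩, hc⟩
    exact ⟨⟨p, hm, hc⟩, by rw [← hc]; exact hk⟩
  · rintro ⟨⟨p, hm, hc⟩, hck⟩
    exact ⟨p, ⟨hm, by rw [hc]; exact hck⟩, hc⟩

theorem contains_erase (d : PySem.Dict Char Int) (k c : Char) :
    (d.erase k).contains c = (d.contains c && !(c == k)) := by
  simp only [PySem.Dict.erase, PySem.Dict.contains]
  exact any_key_filter d.items k c

theorem find?_key_filter (l : List (Char × Int)) (k c : Char) (h : ¬ c = k) :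
    (l.filter (fun p => !(p.1 == k))).find? (fun p => p.1 == c)
      = l.find? (fun p => p.1 == c) := by
  induction l with
  | nil => rfl
  | cons a l ih =>
    by_cases hak : a.1 = k
    · rw [List.filter_cons_of_neg (by simp [hak]), ih,
        List.find?_cons_of_neg (by simp [hak]; intro hkc; exact h hkc.symm)]
    · by_cases hac : a.1 = c
      · rw [List.filter_cons_of_pos (by simp [hak]),
          List.find?_cons_of_pos (by simp [hac]),
          List.find?_cons_of_pos (by simp [hac])]
      · rw [List.filter_cons_of_pos (by simp [hak]),
          List.find?_cons_of_neg (by simp [hac]),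
          List.find?_cons_of_neg (by simp [hac]), ih]

theorem getD_erase (d : PySem.Dict Char Int) (k c : Char) (v : Int) :
    (d.erase k).getD c v = if c = k then v else d.getD c v := by
  by_cases h : c = k
  · subst h
    have hc : (d.erase c).contains c = false := by
      simp [contains_erase]
    simp [PySem.Dict.getD_of_not_contains _ _ hc]
  · simp only [PySem.Dict.getD, PySem.Dict.get?, PySem.Dict.erase, if_neg h]
    rw [find?_key_filter _ _ _ h]

theorem keys_erase (d : PySem.Dict Char Int) (k : Char) :
    (d.erase k).keys = d.keys.filter (fun c => !(c == k)) := by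
  simp only [PySem.Dict.keys, PySem.Dict.erase]
  induction d.items with
  | nil => rfl
  | cons a l ih =>
    by_cases hak : a.1 = k
    · rw [List.filter_cons_of_neg (by simp [hak]), List.map_cons,
        List.filter_cons_of_neg (by simp [hak]), ih]
    · rw [List.filter_cons_of_pos (by simp [hak]), List.map_cons, List.map_cons,
        List.filter_cons_of_pos (by simp [hak]), ih]

theorem nodup_keys_erase (d : PySem.Dict Char Int) (k : Char) (h : d.keys.Nodup) :
    (d.erase k).keys.Nodup := by
  rw [keys_erase]; exact h.filter _

-- counting change when an extra '≠ ch' conjunct is added to a filter over a nodup list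
theorem length_filter_and_ne (xs : List Char) (p : Char → Bool) (ch : Char) (h : xs.Nodup) :
    ((xs.filter (fun c => p c && !(c == ch))).length : Int)
      = ((xs.filter p).length : Int) - (if ch ∈ xs ∧ p ch = true then 1 else 0) := by
  induction xs with
  | nil => simp
  | cons a xs ih =>
    rcases List.nodup_cons.mp h with ⟨hmem, hnd⟩
    have ihx := ih hnd
    by_cases hac : a = ch
    · subst hac
      have hcongr : xs.filter (fun c => p c && !(c == a)) = xs.filter p := by
        apply List.filter_congr
        intro c hc
        have hca : (c == a) = false := by
          simp only [beq_eq_false_iff_ne, ne_eq]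
          intro hca; exact hmem (hca ▸ hc)
        simp [hca]
      have hnin : ¬ (a ∈ xs ∧ p a = true) := fun hh => hmem hh.1
      have hnin2 : (if a ∈ xs ∧ p a = true then (1:Int) else 0) = 0 := if_neg hnin
      by_cases hp : p a = true
      · rw [List.filter_cons_of_neg (by simp [hp]), List.filter_cons_of_pos (by simpa using hp),
          hcongr, if_pos ⟨List.mem_cons_self, hp⟩]
        rw [hnin2] at ihx
        simp only [List.length_cons]
        push_cast
        omega
      · have h1 : (p a && !(a == a)) = false := by simp [hp]
        rw [List.filter_cons_of_neg (by simp [h1]), List.filter_cons_of_neg (by simpa using hp),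
          hcongr, if_neg (fun hh => hp hh.2)]
        rw [hnin2] at ihx
        omega
    · have hif : (if ch ∈ a :: xs ∧ p ch = true then (1:Int) else 0)
          = (if ch ∈ xs ∧ p ch = true then 1 else 0) := by
        by_cases hc : ch ∈ xs ∧ p ch = true
        · rw [if_pos ⟨List.mem_cons_of_mem _ hc.1, hc.2⟩, if_pos hc]
        · rw [if_neg (fun hh => hc ⟨by
              rcases List.mem_cons.mp hh.1 with h' | h'
              · exact absurd h'.symm hac
              · exact h', hh.2⟩), if_neg hc]
      rw [hif]
      by_cases hp : p a = true
      · rw [List.filter_cons_of_pos (by simp [hp, hac]), List.filter_cons_of_pos (by simpa using hp)]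
        simp only [List.length_cons]
        push_cast
        omega
      · rw [List.filter_cons_of_neg (by simp [hp]), List.filter_cons_of_neg (by simpa using hp)]
        exact ihx

-- A's intersection size as a filter over l's (nodup) key list
theorem interA_eq_filter (la ra : PySem.Dict Char Int) (h : la.keys.Nodup) :
    interA la ra = ((la.keys.filter (fun c => ra.contains c)).length : Int) := by
  unfold interA
  rw [PySem.Set.ofList_eq_self_of_nodup _ h]
  show ((List.filter _ la.keys).length : Int) = _
  congr 1
  refine congrArg List.length (List.filter_congr ?_)
  intro x _
  rw [Bool.eq_iff_iff, PySem.Dict.contains_eq_decide_mem_keys]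
  constructor
  · intro hx
    have : x ∈ PySem.Set.ofList ra.keys := by
      simpa [PySem.Set.contains] using hx
    simp [(PySem.Set.mem_ofList _ _).mp this]
  · intro hx
    have hmem : x ∈ ra.keys := by simpa using hx
    simpa [PySem.Set.contains] using (PySem.Set.mem_ofList ra.keys x).mpr hmem

-- membership in keys vs contains
theorem mem_keys_iff_contains (d : PySem.Dict Char Int) (c : Char) :
    c ∈ d.keys ↔ d.contains c = true := by
  simp [PySem.Dict.contains_eq_decide_mem_keys]

-- the main loop correspondence
theorem loop_eq (k : Int) (cs : List Char) (f cm : Int)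
    (la ra lb rb : PySem.Dict Char Int)
    (h1 : ∀ c, la.getD c 0 = lb.getD c 0)
    (h2 : ∀ c, la.contains c = true ↔ 0 < la.getD c 0)
    (h3 : ∀ c, ra.getD c 0 = rb.getD c 0)
    (h4 : ∀ c, ra.contains c = true ↔ 0 < ra.getD c 0)
    (h5 : cm = interA la ra)
    (h6 : ∀ c, 0 ≤ la.getD c 0)
    (h8 : ∀ c, ra.getD c 0 = (cs.count c : Int))
    (hnl : la.keys.Nodup) (hnr : ra.keys.Nodup) :
    (cs.foldl (stepA k) (f, la, ra)).1 = (cs.foldl (stepB k) (f, cm, lb, rb)).1 := by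
  induction cs generalizing f cm la ra lb rb with
  | nil => simp [List.foldl]
  | cons ch cs ih =>
    have hrch : ra.getD ch 0 = (cs.count ch : Int) + 1 := by
      rw [h8 ch]; simp [List.count_cons]
    have hrpos : 0 < ra.getD ch 0 := by
      have : (0 : Int) ≤ (cs.count ch : Int) := Int.natCast_nonneg _
      omega
    have hcr : ra.contains ch = true := (h4 ch).mpr hrpos
    -- A's l-update is always an insert of old+1
    have hlup : (if la.contains ch then la.insert ch (la.getD ch 0 + 1)
                 else la.insert ch 1) = la.insert ch (la.getD ch 0 + 1) := by
      by_cases hcl : la.contains ch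
      · simp [hcl]
      · rw [if_neg hcl, PySem.Dict.getD_of_not_contains _ _ (by simpa using hcl)]
        norm_num
    simp only [List.foldl, stepA, stepB, hcr, if_true, hlup]
    rw [h5]
    set la' := la.insert ch (la.getD ch 0 + 1) with hla'
    have h1' : ∀ c, la'.getD c 0 = (lb.insert ch (lb.getD ch 0 + 1)).getD c 0 := by
      intro c
      simp [hla', PySem.Dict.getD_insert, h1]
    have h2' : ∀ c, la'.contains c = true ↔ 0 < la'.getD c 0 := by
      intro c
      by_cases hc : c = ch
      · subst hc
        simp [hla', PySem.Dict.contains_insert, PySem.Dict.getD_insert]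
        have := h6 c; omega
      · simp [hla', PySem.Dict.contains_insert, PySem.Dict.getD_insert, hc, h2]
    have h6' : ∀ c, 0 ≤ la'.getD c 0 := by
      intro c
      by_cases hc : c = ch
      · subst hc; simp [hla', PySem.Dict.getD_insert]; have := h6 c; omega
      · simp [hla', PySem.Dict.getD_insert, hc, h6]
    have hnl' : la'.keys.Nodup := PySem.Dict.nodup_keys_insert _ _ _ hnl
    have hrbv : rb.getD ch 0 = ra.getD ch 0 := (h3 ch).symm
    have hlbv : lb.getD ch 0 = la.getD ch 0 := (h1 ch).symm
    by_cases hr1 : ra.getD ch 0 = 1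
    · -- A erases ch from r
      rw [if_pos hr1]
      set ra' := ra.erase ch with hra'
      have h3' : ∀ c, ra'.getD c 0 = (rb.insert ch (rb.getD ch 0 - 1)).getD c 0 := by
        intro c
        by_cases hc : c = ch
        · subst hc
          simp [hra', getD_erase, PySem.Dict.getD_insert, hrbv, hr1]
        · simp [hra', getD_erase, PySem.Dict.getD_insert, hc, h3]
      have h4' : ∀ c, ra'.contains c = true ↔ 0 < ra'.getD c 0 := by
        intro c
        by_cases hc : c = ch
        · subst hc; simp [hra', contains_erase, getD_erase]
        · simp [hra', contains_erase, getD_erase, hc, h4]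
      have h8' : ∀ c, ra'.getD c 0 = (cs.count c : Int) := by
        intro c
        by_cases hc : c = ch
        · subst hc
          simp only [hra']
          rw [getD_erase, if_pos rfl]
          omega
        · have hc' : ¬ ch = c := fun hh => hc hh.symm
          rw [hra', getD_erase, if_neg hc, h8 c]
          simp [List.count_cons, hc']
      have hnr' : ra'.keys.Nodup := nodup_keys_erase _ _ hnr
      have hJ : interA la' ra'
          = (if lb.getD ch 0 = 0 ∧ rb.getD ch 0 > 1 then interA la ra + 1
             else if lb.getD ch 0 > 0 ∧ rb.getD ch 0 = 1 then interA la ra - 1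
             else interA la ra) := by
        rw [hlbv, hrbv]
        have hr1' : ¬ (ra.getD ch 0 > 1) := by omega
        have hpred : ∀ c, ra'.contains c = (ra.contains c && !(c == ch)) := by
          intro c; simp [hra', contains_erase]
        by_cases ha : 0 < la.getD ch 0
        · -- ch already a key of l: keys unchanged, intersection loses ch
          have hcl : la.contains ch = true := (h2 ch).mpr ha
          have hkeys : la'.keys = la.keys := by
            rw [hla']; exact PySem.Dict.keys_insert_of_contains _ _ hcl
          rw [if_neg (by omega), if_pos ⟨ha, hr1⟩]
          rw [interA_eq_filter _ _ hnl', interA_eq_filter _ _ hnl, hkeys]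
          have heq : la.keys.filter (fun c => ra'.contains c)
              = la.keys.filter (fun c => ra.contains c && !(c == ch)) := by
            apply List.filter_congr; intro c _; exact hpred c
          rw [heq, length_filter_and_ne la.keys (fun c => ra.contains c) ch hnl]
          rw [if_pos ⟨(mem_keys_iff_contains _ _).mpr hcl, hcr⟩]
        · -- ch not yet a key of l: new key appended but it is no longer in r
          have ha0 : la.getD ch 0 = 0 := by have := h6 ch; omega
          have hcl : la.contains ch = false := by
            cases hb : la.contains ch
            · rfl
            · exact absurd (h2 ch |>.mp hb) (by omega)
          have hkeys : la'.keys = la.keys ++ [ch] := by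
            rw [hla']; exact PySem.Dict.keys_insert_of_not_contains _ _ hcl
          rw [if_neg (by omega), if_neg (by omega)]
          rw [interA_eq_filter _ _ hnl', interA_eq_filter _ _ hnl, hkeys,
            List.filter_append]
          have hch : ([ch].filter (fun c => ra'.contains c)) = [] := by
            simp [hpred]
          rw [hch, List.append_nil]
          have heq : la.keys.filter (fun c => ra'.contains c)
              = la.keys.filter (fun c => ra.contains c && !(c == ch)) := by
            apply List.filter_congr; intro c _; exact hpred c
          rw [heq, length_filter_and_ne la.keys (fun c => ra.contains c) ch hnl]
          have hnm : ¬ (ch ∈ la.keys ∧ ra.contains ch = true) := by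
            rintro ⟨hm, _⟩
            rw [(mem_keys_iff_contains _ _).mp hm] at hcl
            exact Bool.true_eq_false.mp hcl
          rw [if_neg hnm]
          omega
      rw [← hJ]
      exact ih _ _ _ _ _ _ h1' h2' h3' h4' rfl h6' h8' hnl' hnr'
    · -- A decrements r[ch]
      rw [if_neg hr1]
      set ra' := ra.insert ch (ra.getD ch 0 - 1) with hra'
      have hr2 : 1 < ra.getD ch 0 := by omega
      have h3' : ∀ c, ra'.getD c 0 = (rb.insert ch (rb.getD ch 0 - 1)).getD c 0 := by
        intro c
        by_cases hc : c = ch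
        · subst hc; simp [hra', PySem.Dict.getD_insert, hrbv]
        · simp [hra', PySem.Dict.getD_insert, hc, h3]
      have h4' : ∀ c, ra'.contains c = true ↔ 0 < ra'.getD c 0 := by
        intro c
        by_cases hc : c = ch
        · subst hc
          simp [hra', PySem.Dict.contains_insert, PySem.Dict.getD_insert]
          omega
        · simp [hra', PySem.Dict.contains_insert, PySem.Dict.getD_insert, hc, h4]
      have h8' : ∀ c, ra'.getD c 0 = (cs.count c : Int) := by
        intro c
        by_cases hc : c = ch
        · subst hc
          simp only [hra']
          rw [PySem.Dict.getD_insert, if_pos rfl]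
          omega
        · have hc' : ¬ ch = c := fun hh => hc hh.symm
          rw [hra', PySem.Dict.getD_insert, if_neg hc, h8 c]
          simp [List.count_cons, hc']
      have hnr' : ra'.keys.Nodup := PySem.Dict.nodup_keys_insert _ _ _ hnr
      have hpred : ∀ c, ra'.contains c = ra.contains c := by
        intro c
        by_cases hc : c = ch
        · subst hc; simp [hra', PySem.Dict.contains_insert, hcr]
        · simp [hra', PySem.Dict.contains_insert, hc]
      have hJ : interA la' ra'
          = (if lb.getD ch 0 = 0 ∧ rb.getD ch 0 > 1 then interA la ra + 1
             else if lb.getD ch 0 > 0 ∧ rb.getD ch 0 = 1 then interA la ra - 1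
             else interA la ra) := by
        rw [hlbv, hrbv]
        by_cases ha : 0 < la.getD ch 0
        · have hcl : la.contains ch = true := (h2 ch).mpr ha
          have hkeys : la'.keys = la.keys := by
            rw [hla']; exact PySem.Dict.keys_insert_of_contains _ _ hcl
          rw [if_neg (by omega), if_neg (by omega)]
          rw [interA_eq_filter _ _ hnl', interA_eq_filter _ _ hnl, hkeys]
          congr 2
          apply List.filter_congr; intro c _; exact hpred c
        · have ha0 : la.getD ch 0 = 0 := by have := h6 ch; omega
          have hcl : la.contains ch = false := by
            cases hb : la.contains ch
            · rfl
            · exact absurd (h2 ch |>.mp hb) (by omega)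
          have hkeys : la'.keys = la.keys ++ [ch] := by
            rw [hla']; exact PySem.Dict.keys_insert_of_not_contains _ _ hcl
          rw [if_pos ⟨ha0, hr2⟩]
          rw [interA_eq_filter _ _ hnl', interA_eq_filter _ _ hnl, hkeys,
            List.filter_append]
          have hch : ([ch].filter (fun c => ra'.contains c)) = [ch] := by
            simp [hpred, hcr]
          rw [hch]
          have heq : la.keys.filter (fun c => ra'.contains c)
              = la.keys.filter (fun c => ra.contains c) := by
            apply List.filter_congr; intro c _; exact hpred c
          rw [heq]
          simp
      rw [← hJ]
      exact ih _ _ _ _ _ _ h1' h2' h3' h4' rfl h6' h8' hnl' hnr'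

-- ===== VERDICT (by name: the statement is the Claim_ definition above) =====
theorem func_spec : Claim_equal_func := by
  intro s k _
  unfold Spec_func func func_alt
  have hnil : ("".toList : List Char) = [] := rfl
  rw [hnil]
  refine loop_eq k s.toList 0 0 _ _ _ _ ?_ ?_ ?_ ?_ ?_ ?_ ?_ ?_ ?_
  · intro c
    rw [PySem.Dict.getD_counter, PySem.Dict.getD_empty]
    simp
  · intro c
    rw [PySem.Dict.contains_counter]
    simp
  · intro c; rfl
  · intro c
    rw [PySem.Dict.contains_counter, PySem.Dict.getD_counter]
    simp [List.count_pos_iff]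
  · rfl
  · intro c
    rw [PySem.Dict.getD_counter]
    simp
  · intro c
    rw [PySem.Dict.getD_counter]
  · exact PySem.Dict.nodup_keys_counter _
  · exact PySem.Dict.nodup_keys_counter _
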